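-- pv_equiv track=rewrite | github.com/EgorSavchuk/SearchNeighborBot | search_neighbor_bot/lib.py | get_price_to_view
-- ===== SOURCE A (Python) =====
-- def get_price_to_view(price):
--     result_price = ''
--     price = str(price)
--     if len(price) <= 3:
--         return price
--     else:
--         for i in range(0, len(price)):
--             if i == (len(price) - 3):
--                 result_price += '.'
--             result_price += price[i]
--         return result_price
-- ===== SOURCE B (Python) =====
-- def get_price_to_view(price):
--     price = str(price)
--     if len(price) <= 3:
--         return price
--     return price[:-3] + '.' + price[-3:]
-- ===== Notes on version B (the rewrite author's own statement) =====
-- stated objective: simpler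
-- what changed: Replaces the char-by-char accumulation loop with an in-loop position check by direct slice composition price[:-3] + '.' + price[-3:].
import Mathlib
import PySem

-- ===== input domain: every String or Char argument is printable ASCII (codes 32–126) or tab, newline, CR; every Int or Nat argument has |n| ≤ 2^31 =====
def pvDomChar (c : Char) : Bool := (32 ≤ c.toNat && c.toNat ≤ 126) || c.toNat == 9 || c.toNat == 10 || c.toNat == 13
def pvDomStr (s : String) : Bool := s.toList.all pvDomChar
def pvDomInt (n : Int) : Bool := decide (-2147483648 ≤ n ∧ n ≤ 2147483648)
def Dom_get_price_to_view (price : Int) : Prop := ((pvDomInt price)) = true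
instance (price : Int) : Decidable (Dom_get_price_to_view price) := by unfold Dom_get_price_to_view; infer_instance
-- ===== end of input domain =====

-- B replaces A's char-by-char accumulation loop (with its in-loop position check) by direct slice composition (simpler decomposition).

-- ===== PORT A =====
def get_price_to_view (price : Int) : String :=
  let s := PySem.Int.toStr price
  if PySem.Str.len s ≤ 3 then s
  else
    let cs := s.toList
    let result :=
      (PySem.List.pyRange 0 (PySem.Str.len s) 1).foldl
        (fun (acc : List Char) (i : Int) =>
          (if i = PySem.Str.len s - 3 then acc ++ ['.'] else acc)
            ++ [PySem.List.pyGetD cs i ' '])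
        []
    String.ofList result

-- ===== PORT B =====
def get_price_to_view_alt (price : Int) : String :=
  let s := PySem.Int.toStr price
  if PySem.Str.len s ≤ 3 then s
  else
    String.ofList (PySem.List.slice s.toList none (some (-3))
      ++ ['.'] ++ PySem.List.slice s.toList (some (-3)) none)

-- ===== PRECONDITION & SPEC =====
def Spec_get_price_to_view (price : Int) (out : String) : Prop := out = get_price_to_view_alt price
instance (price : Int) (out : String) : Decidable (Spec_get_price_to_view price out) := by unfold Spec_get_price_to_view; infer_instance

-- ===== CLAIM (what is proved, stated in full; the proofs are below) =====
def Claim_equal_get_price_to_view : Prop := ∀ (price : Int), Dom_get_price_to_view price → Spec_get_price_to_view price (get_price_to_view price)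

-- ===== LEMMAS AND PROOFS =====

-- Folding A's loop body over an index range that avoids the dot position collects the corresponding segment.
theorem pv_segif (cs : List Char) (mI : Int) (a : Nat) (b : Nat) (acc : List Char)
    (hb : b ≤ cs.length) (hm : ∀ k : Nat, a ≤ k → k < b → (k : Int) ≠ mI) :
    (PySem.List.pyRange (a : Int) (b : Int) 1).foldl
      (fun (acc : List Char) (i : Int) =>
        (if i = mI then acc ++ ['.'] else acc) ++ [PySem.List.pyGetD cs i ' ']) acc
      = acc ++ ((cs.drop a).take (b - a)) := by
  induction b generalizing acc with
  | zero =>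
    rw [PySem.List.pyRange_one_eq_nil (by exact_mod_cast Nat.zero_le a)]
    simp
  | succ b ih =>
    by_cases hab : a ≤ b
    · have hb' : b ≤ cs.length := by omega
      have hblt : b < cs.length := by omega
      have hc : ((b + 1 : Nat) : Int) = (b : Int) + 1 := by push_cast; ring
      rw [hc, PySem.List.pyRange_one_succ_right (by exact_mod_cast hab), List.foldl_append]
      rw [ih acc hb' (fun k hk1 hk2 => hm k hk1 (by omega))]
      simp only [List.foldl_cons, List.foldl_nil]
      rw [if_neg (hm b hab (by omega))]
      have hget : PySem.List.pyGetD cs ((b : Int)) ' ' = cs[b] := by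
        rw [PySem.List.pyGetD_natCast]
        exact List.getD_eq_getElem cs ' ' hblt
      rw [hget]
      have hstep : (cs.drop a).take (b + 1 - a) = (cs.drop a).take (b - a) ++ [cs[b]] := by
        have he : b + 1 - a = (b - a) + 1 := by omega
        rw [he, List.take_add_one]
        congr 1
        have hix : b - a < (cs.drop a).length := by simp; omega
        simp [List.getElem?_eq_getElem hix, List.getElem_drop]
        congr 1; omega
      rw [hstep, List.append_assoc]
    · have hle : ((b + 1 : Nat) : Int) ≤ (a : Int) := by exact_mod_cast (by omega : b + 1 ≤ a)
      rw [PySem.List.pyRange_one_eq_nil hle]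
      simp [show b + 1 - a = 0 by omega]

-- A's loop over a string of length > 3 produces exactly the dotted split at n - 3.
theorem pv_main (cs : List Char) (h : 3 < cs.length) :
    (PySem.List.pyRange 0 (cs.length : Int) 1).foldl
      (fun (acc : List Char) (i : Int) =>
        (if i = (cs.length : Int) - 3 then acc ++ ['.'] else acc)
          ++ [PySem.List.pyGetD cs i ' '])
      []
    = cs.take (cs.length - 3) ++ '.' :: cs.drop (cs.length - 3) := by
  set n := cs.length with hn
  set m : Nat := n - 3 with hm
  have hmI : ((m : Int)) = (n : Int) - 3 := by omega
  have h2 : (m : Int) < (n : Int) := by omega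
  have hmlt : m < cs.length := by omega
  have hseg1 := pv_segif cs ((n : Int) - 3) 0 m [] (by omega)
    (fun k hk1 hk2 => by omega)
  rw [Nat.cast_zero] at hseg1
  rw [PySem.List.pyRange_one_append 0 (m : Int) (n : Int) (by positivity) (le_of_lt h2),
    List.foldl_append, hseg1, PySem.List.pyRange_one_cons h2, List.foldl_cons,
    if_pos hmI]
  have hget : PySem.List.pyGetD cs ((m : Int)) ' ' = cs[m] := by
    rw [PySem.List.pyGetD_natCast]
    exact List.getD_eq_getElem cs ' ' hmlt
  have hc1 : ((m : Int)) + 1 = ((m + 1 : Nat) : Int) := by push_cast; ring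
  rw [hget, hc1]
  have hseg2 := pv_segif cs ((n : Int) - 3) (m + 1) n
    (([] ++ (cs.drop 0).take (m - 0)) ++ ['.'] ++ [cs[m]]) (le_refl n)
    (fun k hk1 hk2 => by omega)
  rw [hseg2]
  have hdrop1 : (cs.drop (m + 1)).take (n - (m + 1)) = cs.drop (m + 1) := by
    apply List.take_of_length_le
    simp only [List.length_drop]
    omega
  have hsplit : cs.drop m = cs[m] :: cs.drop (m + 1) := List.drop_eq_getElem_cons hmlt
  rw [hdrop1, hsplit]
  simp

-- ===== VERDICT (by name: the statement is the Claim_ definition above) =====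
theorem get_price_to_view_spec : Claim_equal_get_price_to_view := by
  intro price _
  unfold Spec_get_price_to_view get_price_to_view get_price_to_view_alt
  simp only [PySem.Str.len_eq]
  set s := PySem.Int.toStr price with hs
  by_cases hlen : ((s.toList.length : Int)) ≤ 3
  · rw [if_pos hlen, if_pos hlen]
  · rw [if_neg hlen, if_neg hlen]
    have h3 : 3 < s.toList.length := by omega
    congr 1
    rw [PySem.List.slice_to_neg_ofNat s.toList 3 (by norm_num),
      PySem.List.slice_from_neg_ofNat s.toList 3 (by norm_num)]
    refine (pv_main s.toList h3).trans ?_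
    simp
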